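-- pv_equiv track=rewrite | github.com/pat-jj/KARE | kg_construct/umls_source_.py | extract_subgraph
-- ===== SOURCE A (Python) =====
-- def extract_subgraph(graph, cui, depth=1):
--     subgraph = []
--     visited = set()
--     queue = [(cui, 0)]
--     while queue:
--         node, d = queue.pop(0)
--         if node in visited or d > depth:
--             continue
--         visited.add(node)
--         if node in graph:
--             for relation, tail in graph[node]:
--                 subgraph.append((node, relation, tail))
--                 if d < depth:
--                     queue.append((tail, d + 1))
--     return subgraph
-- ===== SOURCE B (Python) =====
-- def extract_subgraph(graph, cui, depth=1):
--     # Two-phase: a recursive traversal computes only the visit ORDER of nodes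
--     # (no edge tuples, no queue); a single flat comprehension then emits all
--     # edges of the ordered nodes.  A instead interleaves emission with a
--     # (node, depth)-tagged FIFO queue popped from the front.
--     def visit_order(frontier, visited, d):
--         if d > depth or not frontier:
--             return []
--         order = []
--         nxt = []
--         for n in frontier:
--             if n not in visited:
--                 visited.add(n)
--                 order.append(n)
--                 if d < depth:
--                     nxt.extend(t for _, t in graph.get(n, []))
--         return order + visit_order(nxt, visited, d + 1)
--     return [(n, r, t) for n in visit_order([cui], set(), 0)
--             for r, t in graph.get(n, [])]
-- ===== Notes on version B (the rewrite author's own statement) =====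
-- stated objective: alternative
-- what changed: B splits the work into two phases: a recursive traversal that computes only the node visit order (no queue, no per-node depth tags, no output tuples), followed by one flat comprehension that emits every edge of the ordered nodes; A builds the output inside a while loop over a (node, depth)-tagged FIFO queue popped with pop(0).
import Mathlib
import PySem

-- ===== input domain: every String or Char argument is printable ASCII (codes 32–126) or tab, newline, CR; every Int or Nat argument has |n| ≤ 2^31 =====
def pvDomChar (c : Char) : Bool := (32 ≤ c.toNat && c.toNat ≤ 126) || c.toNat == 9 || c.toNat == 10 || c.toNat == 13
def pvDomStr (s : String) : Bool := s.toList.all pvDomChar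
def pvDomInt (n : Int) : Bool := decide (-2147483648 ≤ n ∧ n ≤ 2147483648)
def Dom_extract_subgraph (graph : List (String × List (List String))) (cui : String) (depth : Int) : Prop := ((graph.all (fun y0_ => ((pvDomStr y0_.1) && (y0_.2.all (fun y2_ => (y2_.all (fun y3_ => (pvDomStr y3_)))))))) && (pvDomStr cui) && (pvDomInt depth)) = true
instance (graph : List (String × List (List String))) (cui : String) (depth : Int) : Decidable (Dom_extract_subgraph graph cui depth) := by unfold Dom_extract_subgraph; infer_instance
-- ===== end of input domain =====

-- B replaces A's queue-based, emit-as-you-go BFS by two phases: a recursive traversal computing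
-- only the node visit order, then one flat pass emitting the edges of the ordered nodes; equal
-- return value is proved on Pre_ below.

-- ===== PORT A =====
-- total edge count / unvisited-key count, used only for loopA's termination measure
def pvE (graph : List (String × List (List String))) : Nat :=
  (graph.map (fun p => p.2.length)).sum

def pvUK (graph : List (String × List (List String))) (vis : PySem.Set String) : Nat :=
  ((graph.map Prod.fst).filter (fun k => !(PySem.Set.contains vis k))).length

-- one edge of graph[node]: subgraph.append((node, relation, tail)); if d < depth: queue.append((tail, d+1))
def edgeStepA (n : String) (d depth : Int)
    (acc : List (List String) × List (String × Int)) (e : List String) :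
    List (List String) × List (String × Int) :=
  match e with
  | [r, t] => (acc.1 ++ [[n, r, t]], if d < depth then acc.2 ++ [(t, d + 1)] else acc.2)
  | _ => acc

theorem edgeStepA_len_le (n : String) (d depth : Int) :
    ∀ (es : List (List String)) (s : List (List String)) (q : List (String × Int)),
      ((es.foldl (edgeStepA n d depth) (s, q)).2).length ≤ q.length + es.length := by
  intro es
  induction es with
  | nil => intro s q; simp
  | cons e es ih =>
    intro s q
    have h2 : ((edgeStepA n d depth (s, q) e).2).length ≤ q.length + 1 := by
      unfold edgeStepA
      rcases e with _ | ⟨r, _ | ⟨t, _ | _⟩⟩ <;> simp <;> split <;> simp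
    simp only [List.foldl_cons, List.length_cons]
    calc ((es.foldl (edgeStepA n d depth) (edgeStepA n d depth (s, q) e)).2).length
        ≤ ((edgeStepA n d depth (s, q) e).2).length + es.length := by
          have := ih (edgeStepA n d depth (s, q) e).1 (edgeStepA n d depth (s, q) e).2
          simpa using this
      _ ≤ q.length + (es.length + 1) := by omega

theorem pv_filter_le {α : Type} (l : List α) (p q : α → Bool)
    (h : ∀ x ∈ l, q x = true → p x = true) :
    (l.filter q).length ≤ (l.filter p).length := by
  induction l with
  | nil => simp
  | cons x l ih =>
    have ih' := ih (fun y hy => h y (List.mem_cons_of_mem _ hy))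
    by_cases hq : q x = true
    · have hp := h x List.mem_cons_self hq
      simp only [List.filter_cons, hq, hp, if_true, List.length_cons]
      omega
    · have hq' : q x = false := by simpa using hq
      simp only [List.filter_cons, hq', Bool.false_eq_true, if_false]
      by_cases hp : p x = true
      · simp only [hp, if_true, List.length_cons]
        omega
      · have hp' : p x = false := by simpa using hp
        simp only [hp', Bool.false_eq_true, if_false]
        exact ih'

theorem pv_filter_lt {α : Type} (l : List α) (p q : α → Bool)
    (h : ∀ x ∈ l, q x = true → p x = true)
    (a : α) (ha : a ∈ l) (hpa : p a = true) (hqa : q a = false) :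
    (l.filter q).length < (l.filter p).length := by
  induction l with
  | nil => simp at ha
  | cons x l ih =>
    have hrest : ∀ y ∈ l, q y = true → p y = true := fun y hy => h y (List.mem_cons_of_mem _ hy)
    rcases List.mem_cons.mp ha with rfl | ha'
    · have hle := pv_filter_le l p q hrest
      simp only [List.filter_cons, hpa, hqa, Bool.false_eq_true, if_false, if_true, List.length_cons]
      omega
    · have hlt := ih hrest ha'
      by_cases hq : q x = true
      · have hp := h x List.mem_cons_self hq
        simp only [List.filter_cons, hq, hp, if_true, List.length_cons]
        omega
      · have hq' : q x = false := by simpa using hq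
        simp only [List.filter_cons, hq', Bool.false_eq_true, if_false]
        by_cases hp : p x = true
        · simp only [hp, if_true, List.length_cons]
          omega
        · have hp' : p x = false := by simpa using hp
          simp only [hp', Bool.false_eq_true, if_false]
          exact hlt

theorem contains_add_false (vis : PySem.Set String) (n k : String)
    (hk : PySem.Set.contains (PySem.Set.add vis n) k = false) :
    PySem.Set.contains vis k = false := by
  unfold PySem.Set.add at hk
  split at hk
  · exact hk
  · simp only [PySem.Set.contains] at hk ⊢
    simp only [List.contains_append, Bool.or_eq_false_iff] at hk
    exact hk.1

theorem pvUK_add_le (graph : List (String × List (List String))) (vis : PySem.Set String) (n : String) :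
    pvUK graph (PySem.Set.add vis n) ≤ pvUK graph vis := by
  unfold pvUK
  apply pv_filter_le
  intro k _ hk
  simp only [Bool.not_eq_true'] at hk ⊢
  exact contains_add_false vis n k hk

theorem contains_add_self (vis : PySem.Set String) (n : String) :
    PySem.Set.contains (PySem.Set.add vis n) n = true := by
  unfold PySem.Set.add
  split
  · assumption
  · simp [PySem.Set.contains]

theorem pvUK_add_lt (graph : List (String × List (List String))) (vis : PySem.Set String) (n : String)
    (hn : n ∈ graph.map Prod.fst) (hv : PySem.Set.contains vis n = false) :
    pvUK graph (PySem.Set.add vis n) < pvUK graph vis := by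
  unfold pvUK
  apply pv_filter_lt _ _ _ ?_ n hn
  · simp only [Bool.not_eq_true']
    exact hv
  · simp [contains_add_self vis n]
  · intro k _ hk
    simp only [Bool.not_eq_true'] at hk ⊢
    exact contains_add_false vis n k hk

theorem mem_keys_of_get?_mk {ν : Type} (graph : List (String × ν)) (n : String) (v : ν)
    (h : (PySem.Dict.mk graph).get? n = some v) : n ∈ graph.map Prod.fst := by
  induction graph with
  | nil => simp [PySem.Dict.get?] at h
  | cons p rest ih =>
    rw [PySem.Dict.get?_mk_cons] at h
    by_cases hk : p.1 == n
    · simp only [List.map_cons, List.mem_cons]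
      exact Or.inl (eq_of_beq hk).symm
    · simp only [hk, Bool.false_eq_true, if_false] at h
      exact List.mem_cons_of_mem _ (ih h)

theorem get?_mk_len_le (graph : List (String × List (List String))) (n : String)
    (es : List (List String)) (h : (PySem.Dict.mk graph).get? n = some es) :
    es.length ≤ pvE graph := by
  induction graph with
  | nil => simp [PySem.Dict.get?] at h
  | cons p rest ih =>
    rw [PySem.Dict.get?_mk_cons] at h
    unfold pvE
    by_cases hk : p.1 == n
    · simp only [hk, if_true, Option.some.injEq] at h
      subst h
      simp only [List.map_cons, List.sum_cons]
      omega
    · simp only [hk, Bool.false_eq_true, if_false] at h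
      have := ih h
      unfold pvE at this
      simp only [List.map_cons, List.sum_cons]
      omega

-- the while-queue loop of A; terminates since every step either shortens the queue or visits a fresh graph key
def loopA (graph : List (String × List (List String))) (depth : Int) :
    List (String × Int) → PySem.Set String → List (List String) → List (List String)
  | [], _, sub => sub
  | (n, d) :: rest, vis, sub =>
    if hg : PySem.Set.contains vis n || decide (d > depth) then
      loopA graph depth rest vis sub
    else
      let vis' := PySem.Set.add vis n
      match hm : (PySem.Dict.mk graph).get? n with
      | none => loopA graph depth rest vis' sub
      | some edges =>
        let st := edges.foldl (edgeStepA n d depth) (sub, rest)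
        loopA graph depth st.2 vis' st.1
termination_by q vis _ => q.length + (pvE graph + 1) * pvUK graph vis
decreasing_by
  · simp only [List.length_cons]
    omega
  · have h1 := pvUK_add_le graph vis n
    have h2 := Nat.mul_le_mul_left (pvE graph + 1) h1
    simp only [List.length_cons]
    omega
  · have hvf : PySem.Set.contains vis n = false := by
      simp only [Bool.or_eq_true, not_or] at hg
      simpa using hg.1
    have hkey : n ∈ graph.map Prod.fst := mem_keys_of_get?_mk graph n edges hm
    have hlt : pvUK graph (PySem.Set.add vis n) < pvUK graph vis := pvUK_add_lt graph vis n hkey hvf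
    have hq : ((edges.foldl (edgeStepA n d depth) (sub, rest)).2).length ≤ rest.length + edges.length :=
      edgeStepA_len_le n d depth edges sub rest
    have hE : edges.length ≤ pvE graph := get?_mk_len_le graph n edges hm
    have hmul : (pvE graph + 1) * (pvUK graph (PySem.Set.add vis n) + 1) ≤ (pvE graph + 1) * pvUK graph vis :=
      Nat.mul_le_mul_left _ hlt
    have hdistr : (pvE graph + 1) * (pvUK graph (PySem.Set.add vis n) + 1)
        = (pvE graph + 1) * pvUK graph (PySem.Set.add vis n) + (pvE graph + 1) := by ring
    simp only [List.length_cons]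
    omega

def extract_subgraph (graph : List (String × List (List String))) (cui : String) (depth : Int) : List (List String) :=
  loopA graph depth [(cui, 0)] PySem.Set.empty []

-- ===== PORT B =====
-- tails of graph.get(n, []): the generator 't for _, t in graph.get(n, [])'
def tailsB (es : List (List String)) : List String :=
  es.flatMap (fun e => match e with | [_, t] => [t] | _ => [])

-- one node n of the frontier, phase 1: state (order, visited, next_frontier)
def visitStepB (graph : List (String × List (List String))) (depth d : Int)
    (st : List String × PySem.Set String × List String) (n : String) :
    List String × PySem.Set String × List String :=
  if PySem.Set.contains st.2.1 n then st
  else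
    (st.1 ++ [n], PySem.Set.add st.2.1 n,
     if d < depth then st.2.2 ++ tailsB ((PySem.Dict.mk graph).getD n []) else st.2.2)

-- the recursive visit_order: order of this level's fresh nodes, then recurse on next_frontier
def visitOrderB (graph : List (String × List (List String))) (depth : Int)
    (frontier : List String) (vis : PySem.Set String) (d : Int) : List String :=
  if d > depth ∨ frontier = [] then []
  else
    let r := frontier.foldl (visitStepB graph depth d) ([], vis, [])
    r.1 ++ visitOrderB graph depth r.2.2 r.2.1 (d + 1)
termination_by (depth + 1 - d).toNat
decreasing_by omega

-- phase 2: one flat pass, '(n, r, t) for n in order for r, t in graph.get(n, [])'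
def emitB (graph : List (String × List (List String))) (n : String) : List (List String) :=
  ((PySem.Dict.mk graph).getD n []).flatMap
    (fun e => match e with | [r, t] => [[n, r, t]] | _ => [])

def extract_subgraph_alt (graph : List (String × List (List String))) (cui : String) (depth : Int) : List (List String) :=
  (visitOrderB graph depth [cui] PySem.Set.empty 0).flatMap (emitB graph)

-- ===== PRECONDITION & SPEC =====
-- Pre_ excludes (a) association lists with duplicate keys, which do not represent any Python
-- dict, and (b) graphs containing an edge list whose length is not 2 — on reached nodes the
-- Python unpacking 'for relation, tail in graph[node]' raises ValueError.  Exclusion (b) only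
-- applies when something can be reached at all (depth ≥ 0 and cui is a key); it is still slightly
-- wider than the raising inputs: a malformed edge under an unreached key also falls outside,
-- although A then returns normally.
def Pre_extract_subgraph (graph : List (String × List (List String))) (cui : String) (depth : Int) : Prop :=
  (graph.map Prod.fst).Nodup ∧
  (depth < 0 ∨ cui ∉ graph.map Prod.fst ∨ ∀ p ∈ graph, ∀ e ∈ p.2, e.length = 2)
instance (graph : List (String × List (List String))) (cui : String) (depth : Int) : Decidable (Pre_extract_subgraph graph cui depth) := by unfold Pre_extract_subgraph; infer_instance

def pvWitness_extract_subgraph : (List (String × List (List String))) × String × Int :=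
  ([("a", [["r", "b"]]), ("b", [["s", "c"]])], "a", 1)

def Spec_extract_subgraph (graph : List (String × List (List String))) (cui : String) (depth : Int) (out : List (List String)) : Prop := out = extract_subgraph_alt graph cui depth
instance (graph : List (String × List (List String))) (cui : String) (depth : Int) (out : List (List String)) : Decidable (Spec_extract_subgraph graph cui depth out) := by unfold Spec_extract_subgraph; infer_instance

-- ===== CLAIM (what is proved, stated in full; the proofs are below) =====
def Claim_equal_extract_subgraph : Prop := ∀ (graph : List (String × List (List String))) (cui : String) (depth : Int), Dom_extract_subgraph graph cui depth → Pre_extract_subgraph graph cui depth → Spec_extract_subgraph graph cui depth (extract_subgraph graph cui depth)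

-- ===== LEMMAS AND PROOFS =====

-- tuples emitted for the edges of one node, and the tails pushed for the next level
def pvEmits (n : String) (es : List (List String)) : List (List String) :=
  es.flatMap (fun e => match e with | [r, t] => [[n, r, t]] | _ => [])

theorem foldl_edgeStepA (n : String) (d depth : Int) :
    ∀ (es : List (List String)) (s : List (List String)) (q : List (String × Int)),
      es.foldl (edgeStepA n d depth) (s, q)
        = (s ++ pvEmits n es,
           q ++ (if d < depth then (tailsB es).map (fun t => (t, d + 1)) else [])) := by
  intro es
  induction es with
  | nil => intro s q; simp [pvEmits, tailsB]
  | cons e es ih =>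
    intro s q
    rcases e with _ | ⟨r, _ | ⟨t, _ | ⟨x, e'⟩⟩⟩ <;>
      simp only [List.foldl_cons, edgeStepA, ih, pvEmits, tailsB, List.flatMap_cons] <;>
      split <;> simp

-- emitB in terms of get?
theorem emitB_of_get?_none (graph : List (String × List (List String))) (n : String)
    (h : (PySem.Dict.mk graph).get? n = none) : emitB graph n = [] := by
  unfold emitB
  rw [PySem.Dict.getD_eq_get?_getD, h]
  rfl

theorem emitB_of_get?_some (graph : List (String × List (List String))) (n : String)
    (es : List (List String)) (h : (PySem.Dict.mk graph).get? n = some es) :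
    emitB graph n = pvEmits n es := by
  unfold emitB pvEmits
  rw [PySem.Dict.getD_eq_get?_getD, h, Option.getD_some]

-- the order component of the frontier fold only ever appends; the other components ignore it
theorem foldl_visitStepB_order (graph : List (String × List (List String))) (depth d : Int) :
    ∀ (front : List String) (ord : List String) (vis : PySem.Set String) (nxt : List String),
      front.foldl (visitStepB graph depth d) (ord, vis, nxt)
        = (ord ++ (front.foldl (visitStepB graph depth d) ([], vis, nxt)).1,
           (front.foldl (visitStepB graph depth d) ([], vis, nxt)).2) := by
  intro front
  induction front with
  | nil => intro ord vis nxt; simp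
  | cons n front ih =>
    intro ord vis nxt
    simp only [List.foldl_cons]
    by_cases hv : PySem.Set.contains vis n
    · have hv' : n ∈ vis := by simpa using hv
      have h1 : visitStepB graph depth d (ord, vis, nxt) n = (ord, vis, nxt) := by
        simp [visitStepB, hv, hv']
      have h2 : visitStepB graph depth d (([] : List String), vis, nxt) n = ([], vis, nxt) := by
        simp [visitStepB, hv, hv']
      rw [h1, h2, ih]
    · have hv' : n ∉ vis := by simpa using hv
      have h1 : visitStepB graph depth d (ord, vis, nxt) n
          = (ord ++ [n], PySem.Set.add vis n,
             if d < depth then nxt ++ tailsB ((PySem.Dict.mk graph).getD n []) else nxt) := by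
        simp [visitStepB, hv, hv']
      have h2 : visitStepB graph depth d (([] : List String), vis, nxt) n
          = ([n], PySem.Set.add vis n,
             if d < depth then nxt ++ tailsB ((PySem.Dict.mk graph).getD n []) else nxt) := by
        simp [visitStepB, hv, hv']
      rw [h1, h2, ih, ih [n]]
      simp

-- entries tagged past depth are all skipped by A's loop
theorem loopA_skip (graph : List (String × List (List String))) (depth : Int) :
    ∀ (front : List String) (vis : PySem.Set String) (sub : List (List String)),
      loopA graph depth (front.map (fun t => (t, depth + 1))) vis sub = sub := by
  intro front
  induction front with
  | nil => intro vis sub; simp [loopA]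
  | cons n front ih =>
    intro vis sub
    rw [List.map_cons, loopA]
    have hd : decide (depth + 1 > depth) = true := by simp
    rw [hd, Bool.or_true, dif_pos rfl]
    exact ih vis sub

-- mid-level bridge: a queue made of the rest of the current frontier (at d) followed by the
-- accumulated next frontier (at d+1) emits exactly the edges of this level's fresh nodes,
-- then continues at level d+1
theorem loopA_mid (graph : List (String × List (List String))) (depth : Int) (d : Int) (hd : d ≤ depth) :
    ∀ (front : List String) (nxt : List String) (vis : PySem.Set String) (sub : List (List String)),
      loopA graph depth (front.map (fun n => (n, d)) ++ nxt.map (fun t => (t, d + 1))) vis sub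
        = (let r := front.foldl (visitStepB graph depth d) ([], vis, nxt)
           loopA graph depth (r.2.2.map (fun t => (t, d + 1))) r.2.1
             (sub ++ r.1.flatMap (emitB graph))) := by
  intro front
  induction front with
  | nil => intro nxt vis sub; simp
  | cons n front ih =>
    intro nxt vis sub
    rw [List.map_cons, List.cons_append, loopA]
    have hdd : decide (d > depth) = false := by simp; omega
    rw [hdd, Bool.or_false]
    simp only [List.foldl_cons]
    by_cases hv : PySem.Set.contains vis n
    · rw [dif_pos hv]
      have hv' : n ∈ vis := by simpa using hv
      have hstep : visitStepB graph depth d (([] : List String), vis, nxt) n = ([], vis, nxt) := by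
        simp [visitStepB, hv, hv']
      rw [hstep]
      exact ih nxt vis sub
    · rw [dif_neg hv]
      have hvf : PySem.Set.contains vis n = false := by simpa using hv
      have hv' : n ∉ vis := by simpa using hvf
      have hstep : visitStepB graph depth d (([] : List String), vis, nxt) n
          = ([n], PySem.Set.add vis n,
             if d < depth then nxt ++ tailsB ((PySem.Dict.mk graph).getD n []) else nxt) := by
        simp [visitStepB, hvf, hv']
      rw [hstep, foldl_visitStepB_order]
      rcases hget : (PySem.Dict.mk graph).get? n with _ | edges
      · have hgd : (PySem.Dict.mk graph).getD n ([] : List (List String)) = [] := by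
          rw [PySem.Dict.getD_eq_get?_getD, hget]
          rfl
        have hnxt : (if d < depth then nxt ++ tailsB ((PySem.Dict.mk graph).getD n []) else nxt) = nxt := by
          rw [hgd]
          simp [tailsB]
        rw [hnxt, ih nxt (PySem.Set.add vis n) sub]
        simp [emitB_of_get?_none graph n hget]
      · simp only [hget]
        have hgd : (PySem.Dict.mk graph).getD n ([] : List (List String)) = edges := by
          rw [PySem.Dict.getD_eq_get?_getD, hget, Option.getD_some]
        have hfold := foldl_edgeStepA n d depth edges sub (front.map (fun n => (n, d)) ++ nxt.map (fun t => (t, d + 1)))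
        rw [hfold]
        have hq : front.map (fun n => (n, d)) ++ nxt.map (fun t => (t, d + 1))
              ++ (if d < depth then (tailsB edges).map (fun t => (t, d + 1)) else [])
            = front.map (fun n => (n, d))
              ++ (if d < depth then nxt ++ tailsB ((PySem.Dict.mk graph).getD n []) else nxt).map (fun t => (t, d + 1)) := by
          rw [hgd, List.append_assoc]
          congr 1
          split <;> simp
        rw [hq, ih _ (PySem.Set.add vis n) (sub ++ pvEmits n edges)]
        simp [emitB_of_get?_some graph n edges hget]

-- level chain: from the start of level d to the end of the traversal
theorem loopA_outer (graph : List (String × List (List String))) (depth : Int) :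
    ∀ (k : Nat) (d : Int), d + k = depth + 1 →
    ∀ (front : List String) (vis : PySem.Set String) (sub : List (List String)),
      loopA graph depth (front.map (fun n => (n, d))) vis sub
        = sub ++ (visitOrderB graph depth front vis d).flatMap (emitB graph) := by
  intro k
  induction k with
  | zero =>
    intro d hdk front vis sub
    have hde : d = depth + 1 := by simpa using hdk
    subst hde
    rw [visitOrderB, if_pos (Or.inl (by omega))]
    simpa using loopA_skip graph depth front vis sub
  | succ k ih =>
    intro d hdk front vis sub
    have hdle : d ≤ depth := by omega
    cases front with
    | nil => simp [loopA, visitOrderB]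
    | cons n front' =>
      rw [visitOrderB, if_neg (by simp; omega)]
      have hmid := loopA_mid graph depth d hdle (n :: front') [] vis sub
      simp only [List.map_nil, List.append_nil] at hmid
      rw [hmid]
      set r := (n :: front').foldl (visitStepB graph depth d) (([] : List String), vis, ([] : List String)) with hr
      rw [ih (d + 1) (by omega) r.2.2 r.2.1 (sub ++ r.1.flatMap (emitB graph))]
      simp

-- ===== VERDICT (by name: the statement is the Claim_ definition above) =====
theorem extract_subgraph_spec : Claim_equal_extract_subgraph := by
  intro graph cui depth _ _
  unfold Spec_extract_subgraph extract_subgraph extract_subgraph_alt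
  by_cases hdep : 0 ≤ depth
  · have h1 : [(cui, (0 : Int))] = [cui].map (fun n => (n, (0 : Int))) := rfl
    rw [h1, loopA_outer graph depth (depth + 1).toNat 0 (by omega)]
    simp
  · rw [loopA]
    have hg : decide ((0 : Int) > depth) = true := by simp; omega
    rw [hg, Bool.or_true, dif_pos rfl, loopA]
    rw [visitOrderB, if_pos (Or.inl (by omega))]
    simp
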